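-- pv_equiv track=rewrite | github.com/star14ms/Rosalind | Algorithmic_Heights/_31_GS.py | find_mother_vertex
-- ===== SOURCE A (Python) =====
-- def dfs(graph, vertex, visited):
--     visited[vertex] = True
--     for neighbor in graph[vertex]:
--         if not visited[neighbor]:
--             dfs(graph, neighbor, visited)
--
-- def find_mother_vertex(n, edges):
--     # Build the graph
--     graph = {i: [] for i in range(1, n+1)}
--     for u, v in edges:
--         graph[u].append(v)
--
--     visited = [False] * (n + 1)
--     last_visited = 0
--     # Perform DFS and find the last finished vertex
--     for i in range(1, n+1):
--         if not visited[i]: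
--             dfs(graph, i, visited)
--             last_visited = i
--
--     # Check if the last finished vertex can reach all vertices
--     visited = [False] * (n + 1)
--     dfs(graph, last_visited, visited)
--
--     if all(visited[1:]):  # Exclude the dummy 0 index
--         return last_visited
--     else:
--         return -1
-- ===== SOURCE B (Python) =====
-- def find_mother_vertex(n, edges):
--     # Edge-relaxation fixpoint over the raw edge list (no adjacency structure,
--     # no recursion/stack): reach(s) = least superset of {s} closed under the
--     # edges, computed by sweeping the edge list until a sweep changes nothing.
--     # Reachable sets are traversal-order independent, so the two-phase
--     # mother-vertex scheme yields the same last root and the same final check.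
--     def closure(start):
--         inset = [False] * (n + 1)
--         inset[start] = True
--         changed = True
--         while changed:
--             changed = False
--             for u, v in edges:
--                 if inset[u] and not inset[v]:
--                     inset[v] = True
--                     changed = True
--         return inset
--
--     reached = [False] * (n + 1)
--     last = 0
--     for i in range(1, n + 1):
--         if not reached[i]:
--             comp = closure(i)
--             reached = [a or b for a, b in zip(reached, comp)]
--             last = i
--
--     comp = closure(last)
--     return last if all(comp[1:]) else -1
-- ===== Notes on version B (the rewrite author's own statement) =====
-- stated objective: alternative
-- what changed: The recursive adjacency-list DFS is replaced by an edge-relaxation fixpoint: reach(s) is a boolean table grown by repeatedly sweeping the raw edge list (adding targets of reached sources) until a sweep changes nothing, and phase-1 merges it into 'reached' with a zip — no adjacency dict, no recursion; reachable sets are traversal-order independent, so the two-phase mother-vertex scheme returns the same value.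
-- outside the precondition, e.g. on find_mother_vertex(2, [(2, -1)]): A returns -1, B returns -1
import Mathlib
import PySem

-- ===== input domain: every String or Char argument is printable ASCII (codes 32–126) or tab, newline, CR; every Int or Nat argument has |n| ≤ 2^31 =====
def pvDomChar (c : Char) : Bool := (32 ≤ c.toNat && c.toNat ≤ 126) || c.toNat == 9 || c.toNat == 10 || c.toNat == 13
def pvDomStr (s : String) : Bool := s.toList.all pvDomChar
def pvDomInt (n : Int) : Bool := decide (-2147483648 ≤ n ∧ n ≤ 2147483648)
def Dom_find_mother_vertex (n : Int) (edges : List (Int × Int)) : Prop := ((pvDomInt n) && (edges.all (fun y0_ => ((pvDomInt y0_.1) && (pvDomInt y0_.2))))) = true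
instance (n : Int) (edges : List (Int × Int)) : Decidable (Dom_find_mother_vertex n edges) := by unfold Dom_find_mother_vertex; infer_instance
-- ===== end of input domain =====

-- B replaces A's recursive adjacency-list DFS by an edge-relaxation fixpoint
-- (repeatedly sweep the raw edge list, adding targets of reached sources until
-- nothing changes); the two-phase mother-vertex scheme is kept, reachable sets
-- are order-independent, so the results agree.

-- ===== PORT A =====

-- visited[i] read (Python negative indices wrap; out of range gives a default,
-- which is only reached outside Pre_)
def vget (vis : List Bool) (i : Int) : Bool := (PySem.List.pyGet? vis i).getD false
-- visited[i] = b
def vset (vis : List Bool) (i : Int) (b : Bool) : List Bool := PySem.List.pySetD vis i b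

-- graph = {i: [] for i in range(1, n+1)}; for u, v in edges: graph[u].append(v)
def buildGraph (n : Int) (edges : List (Int × Int)) : PySem.Dict Int (List Int) :=
  edges.foldl (fun d p => d.modify p.1 [] (fun l => l ++ [p.2]))
    ((PySem.List.pyRange 1 (n+1) 1).foldl (fun d i => d.insert i ([] : List Int)) PySem.Dict.empty)

-- A's recursive dfs; the fuel is only a totality device (never exhausted under Pre_)
def dfsA (f : Nat) (g : PySem.Dict Int (List Int)) (v : Int) (vis : List Bool) : List Bool :=
  match f with
  | 0 => vis
  | Nat.succ f' =>
      (g.getD v []).foldl (fun vv nb => if vget vv nb then vv else dfsA f' g nb vv)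
        (vset vis v true)

def find_mother_vertex (n : Int) (edges : List (Int × Int)) : Int :=
  let graph := buildGraph n edges
  let p := (PySem.List.pyRange 1 (n+1) 1).foldl
      (fun (st : List Bool × Int) i => if vget st.1 i then st else (dfsA (n.toNat + 2) graph i st.1, i))
      (List.replicate (n+1).toNat false, 0)
  let visited := dfsA (n.toNat + 2) graph p.2 (List.replicate (n+1).toNat false)
  if (PySem.List.slice visited (some 1) none).all (fun b => b) then p.2 else -1

-- ===== PORT B =====

-- one pass of 'for u, v in edges: if inset[u] and not inset[v]: inset[v] = True; changed = True'
def relaxStepL (p : List Bool × Bool) (e : Int × Int) : List Bool × Bool :=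
  if vget p.1 e.1 && !vget p.1 e.2 then (vset p.1 e.2 true, true) else p

-- B's 'while changed' fixpoint loop; the fuel is only a totality device: each
-- changed sweep marks at least one new slot of the length-(n+1) table, so
-- n.toNat+3 sweeps always suffice where the Python terminates
def closeBL (f : Nat) (edges : List (Int × Int)) (inset : List Bool) : List Bool :=
  match f with
  | 0 => inset
  | Nat.succ f' =>
      let st := edges.foldl relaxStepL (inset, false)
      if st.2 then closeBL f' edges st.1 else st.1

def find_mother_vertex_alt (n : Int) (edges : List (Int × Int)) : Int :=
  let p := (PySem.List.pyRange 1 (n+1) 1).foldl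
      (fun (st : List Bool × Int) i =>
        if vget st.1 i then st
        else
          let comp := closeBL (n.toNat + 3) edges (vset (List.replicate (n+1).toNat false) i true)
          (List.zipWith (fun a b => a || b) st.1 comp, i))
      (List.replicate (n+1).toNat false, 0)
  let comp := closeBL (n.toNat + 3) edges (vset (List.replicate (n+1).toNat false) p.2 true)
  if (PySem.List.slice comp (some 1) none).all (fun b => b) then p.2 else -1

-- ===== PRECONDITION & SPEC =====

-- Pre_ excludes n < 1 and edge lists with an endpoint outside 1..n: there A raises
-- KeyError/IndexError while building the graph or during the phase-1 sweep (which expands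
-- every vertex), except for rare negative-target inputs where Python's negative-index
-- wraparound happens to hit an already-visited slot and A accidentally returns.
def Pre_find_mother_vertex (n : Int) (edges : List (Int × Int)) : Prop :=
  1 ≤ n ∧ ∀ e ∈ edges, 1 ≤ e.1 ∧ e.1 ≤ n ∧ 1 ≤ e.2 ∧ e.2 ≤ n
instance (n : Int) (edges : List (Int × Int)) : Decidable (Pre_find_mother_vertex n edges) := by
  unfold Pre_find_mother_vertex; infer_instance

def pvWitness_find_mother_vertex : Int × (List (Int × Int)) := (3, [(1,2),(2,3),(3,1)])

def Spec_find_mother_vertex (n : Int) (edges : List (Int × Int)) (out : Int) : Prop := out = find_mother_vertex_alt n edges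
instance (n : Int) (edges : List (Int × Int)) (out : Int) : Decidable (Spec_find_mother_vertex n edges out) := by unfold Spec_find_mother_vertex; infer_instance

-- ===== CLAIM (what is proved, stated in full; the proofs are below) =====
def Claim_equal_find_mother_vertex : Prop := ∀ (n : Int) (edges : List (Int × Int)), Dom_find_mother_vertex n edges → Pre_find_mother_vertex n edges → Spec_find_mother_vertex n edges (find_mother_vertex n edges)

-- ===== LEMMAS AND PROOFS =====

-- all out-neighbours listed in g are valid vertex indices below L
def GV (g : PySem.Dict Int (List Int)) (L : Nat) : Prop :=
  ∀ w x, x ∈ g.getD w [] → 0 ≤ x ∧ x < (L : Int)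

-- reachability along the edge list (no visited-set restriction)
inductive EReach (E : List (Int × Int)) : Int → Int → Prop
  | refl (v : Int) : EReach E v v
  | tail {u w x : Int} : EReach E u w → (w, x) ∈ E → EReach E u x

-- x is reachable from s by a path all of whose vertices are unvisited in vis
inductive Reach (g : PySem.Dict Int (List Int)) (vis : List Bool) : Int → Int → Prop
  | refl (v : Int) : vget vis v = false → Reach g vis v v
  | tail {v w x : Int} : Reach g vis v w → x ∈ g.getD w [] → vget vis x = false → Reach g vis v x

-- what one dfs call guarantees, relative to its start set S and base visited list vis
structure VisitInv (g : PySem.Dict Int (List Int)) (L : Nat) (S : Int → Prop)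
    (vis vis' : List Bool) : Prop where
  len : vis'.length = vis.length
  cf : vis'.count false ≤ vis.count false
  mono : ∀ x, 0 ≤ x → x < (L:Int) → vget vis x = true → vget vis' x = true
  sound : ∀ x, 0 ≤ x → x < (L:Int) → vget vis' x = true →
    vget vis x = true ∨ ∃ s, S s ∧ vget vis s = false ∧ Reach g vis s x
  start : ∀ s, S s → vget vis' s = true
  closed : ∀ w, 0 ≤ w → w < (L:Int) → vget vis w = false → vget vis' w = true →
    ∀ x, x ∈ g.getD w [] → vget vis' x = true

lemma vget_eq_getElem (vis : List Bool) (j : Nat) (h : j < vis.length) :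
    vget vis (j:Int) = vis[j] := by
  simp [vget, PySem.List.pyGet?_natCast, List.getElem?_eq_getElem h]

lemma vget_eq_getElem' (vis : List Bool) (x : Int) (h0 : 0 ≤ x) (h1 : x < (vis.length : Int)) :
    vget vis x = vis[x.toNat]'(by omega) := by
  rw [vget, PySem.List.pyGet?_of_nonneg _ h0, List.getElem?_eq_getElem (by omega)]
  rfl

lemma length_vset (vis : List Bool) (i : Int) (b : Bool) : (vset vis i b).length = vis.length := by
  simp [vset, PySem.List.length_pySetD]

lemma vget_vset (vis : List Bool) (v x : Int) (hv0 : 0 ≤ v) (hv1 : v < (vis.length : Int))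
    (hx0 : 0 ≤ x) (hx1 : x < (vis.length : Int)) :
    vget (vset vis v true) x = if x = v then true else vget vis x := by
  have hlen : (vset vis v true).length = vis.length := length_vset _ _ _
  rw [vget_eq_getElem' _ _ hx0 (by rw [hlen]; exact hx1)]
  by_cases hxv : x = v
  · subst hxv
    simp only [vset, PySem.List.pySetD_of_nonneg _ _ hv0]
    simp
  · have hne : v.toNat ≠ x.toNat := by omega
    simp only [vset, PySem.List.pySetD_of_nonneg _ _ hv0]
    rw [List.getElem_set_ne hne]
    rw [vget_eq_getElem' _ _ hx0 hx1]
    simp [hxv]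

lemma count_false_set : ∀ (l : List Bool) (m : Nat) (h : m < l.length), l[m] = false →
    (l.set m true).count false + 1 = l.count false := by
  intro l
  induction l with
  | nil => intro m h; simp at h
  | cons hd tl ih =>
    intro m h hm
    cases m with
    | zero =>
      simp only [List.getElem_cons_zero] at hm
      subst hm
      simp
    | succ m' =>
      simp only [List.getElem_cons_succ] at hm
      have := ih m' (by simpa using h) hm
      simp only [List.set_cons_succ, List.count_cons]
      omega

lemma cf_vset (vis : List Bool) (v : Int) (hv0 : 0 ≤ v) (hv1 : v < (vis.length : Int))
    (hfresh : vget vis v = false) :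
    (vset vis v true).count false + 1 = vis.count false := by
  rw [vset, PySem.List.pySetD_of_nonneg _ _ hv0]
  apply count_false_set
  rw [vget_eq_getElem' _ _ hv0 hv1] at hfresh
  exact hfresh

lemma cf_pos_of_fresh (vis : List Bool) (v : Int) (hv0 : 0 ≤ v) (hv1 : v < (vis.length : Int))
    (hfresh : vget vis v = false) : 1 ≤ vis.count false := by
  rw [vget_eq_getElem' _ _ hv0 hv1] at hfresh
  have hmem : (false : Bool) ∈ vis := by
    rw [← hfresh]; exact List.getElem_mem _
  exact List.count_pos_iff.2 hmem

lemma all_marked_of_cf_zero (vis : List Bool) (h : vis.count false = 0) (x : Int)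
    (hx0 : 0 ≤ x) (hx1 : x < (vis.length : Int)) : vget vis x = true := by
  rw [vget_eq_getElem' _ _ hx0 hx1]
  by_contra hc
  simp only [Bool.not_eq_true] at hc
  have hmem : (false : Bool) ∈ vis := by rw [← hc]; exact List.getElem_mem _
  have := List.count_pos_iff.2 hmem
  omega

lemma vget_replicate (k : Nat) (x : Int) : vget (List.replicate k false) x = false := by
  unfold vget
  cases h : PySem.List.pyGet? (List.replicate k false) x with
  | none => simp
  | some b =>
    have hmem := PySem.List.mem_of_pyGet?_eq_some _ h
    have hb := List.eq_of_mem_replicate hmem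
    subst hb; simp

lemma reach_trans {g : PySem.Dict Int (List Int)} {vis : List Bool} {u v x : Int}
    (h1 : Reach g vis u v) (h2 : Reach g vis v x) : Reach g vis u x := by
  induction h2 with
  | refl _ => exact h1
  | tail _ hmem hf ih => exact Reach.tail ih hmem hf

lemma reach_anti {g : PySem.Dict Int (List Int)} {L : Nat} {vis vis₁ : List Bool} {s x : Int}
    (hGV : GV g L) (hs : 0 ≤ s ∧ s < (L:Int))
    (hmono : ∀ y, 0 ≤ y → y < (L:Int) → vget vis y = true → vget vis₁ y = true)
    (h : Reach g vis₁ s x) : Reach g vis s x := by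
  induction h with
  | refl hv =>
    apply Reach.refl
    by_contra hc
    simp only [Bool.not_eq_false] at hc
    rw [hmono s hs.1 hs.2 hc] at hv; simp at hv
  | tail hR hmem hf ih =>
    have hxr := hGV _ _ hmem
    apply Reach.tail ih hmem
    by_contra hc
    simp only [Bool.not_eq_false] at hc
    rw [hmono _ hxr.1 hxr.2 hc] at hf; simp at hf

lemma visitInv_trans {g : PySem.Dict Int (List Int)} {L : Nat} {S S₁ S₂ : Int → Prop}
    {vis vis₁ vis₂ : List Bool} (hGV : GV g L)
    (h1 : VisitInv g L S₁ vis vis₁) (h2 : VisitInv g L S₂ vis₁ vis₂)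
    (hS₁ : ∀ s, S₁ s → S s) (hS₂ : ∀ s, S₂ s → S s) (hcov : ∀ s, S s → S₁ s ∨ S₂ s)
    (hr₁ : ∀ s, S₁ s → 0 ≤ s ∧ s < (L:Int)) (hr₂ : ∀ s, S₂ s → 0 ≤ s ∧ s < (L:Int)) :
    VisitInv g L S vis vis₂ := by
  refine ⟨h2.len.trans h1.len, h2.cf.trans h1.cf, ?_, ?_, ?_, ?_⟩
  · intro x hx0 hx1 hm; exact h2.mono x hx0 hx1 (h1.mono x hx0 hx1 hm)
  · intro x hx0 hx1 hm
    rcases h2.sound x hx0 hx1 hm with hm1 | ⟨s, hs, hf1, hr1⟩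
    · rcases h1.sound x hx0 hx1 hm1 with hm0 | ⟨s, hs, hf, hr⟩
      · exact Or.inl hm0
      · exact Or.inr ⟨s, hS₁ s hs, hf, hr⟩
    · have hsr := hr₂ s hs
      have hf0 : vget vis s = false := by
        by_contra hc
        simp only [Bool.not_eq_false] at hc
        rw [h1.mono s hsr.1 hsr.2 hc] at hf1; simp at hf1
      exact Or.inr ⟨s, hS₂ s hs, hf0, reach_anti hGV hsr h1.mono hr1⟩
  · intro s hs
    rcases hcov s hs with h | h
    · have hsr := hr₁ s h
      exact h2.mono s hsr.1 hsr.2 (h1.start s h)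
    · exact h2.start s h
  · intro w hw0 hw1 hf hm x hmem
    have hxr := hGV _ _ hmem
    by_cases hm1 : vget vis₁ w = true
    · exact h2.mono x hxr.1 hxr.2 (h1.closed w hw0 hw1 hf hm1 x hmem)
    · exact h2.closed w hw0 hw1 (by simpa using hm1) hm x hmem

lemma visitInv_refl {g : PySem.Dict Int (List Int)} {L : Nat} {S : Int → Prop} {vis : List Bool}
    (hstart : ∀ s, S s → vget vis s = true) : VisitInv g L S vis vis := by
  refine ⟨rfl, le_refl _, fun x _ _ h => h, fun x _ _ h => Or.inl h, hstart, ?_⟩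
  intro w _ _ hf hm
  rw [hf] at hm; simp at hm

-- the recursive dfs and its inner neighbour loop satisfy the VisitInv contract
lemma dfs_bundle (g : PySem.Dict Int (List Int)) (L : Nat) (hGV : GV g L) : ∀ (f : Nat),
    (∀ (v : Int) (vis : List Bool), vis.length = L → 0 ≤ v → v < (L:Int) → vget vis v = false →
      vis.count false ≤ f → VisitInv g L (· = v) vis (dfsA f g v vis))
    ∧ (∀ (ns : List Int) (vis : List Bool), vis.length = L →
      (∀ x ∈ ns, 0 ≤ x ∧ x < (L:Int)) → vis.count false ≤ f →
      VisitInv g L (· ∈ ns) vis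
        (ns.foldl (fun vv nb => if vget vv nb then vv else dfsA f g nb vv) vis)) := by
  intro f
  induction f with
  | zero =>
    constructor
    · intro v vis hlen hv0 hv1 hfresh hcf
      exfalso
      have := cf_pos_of_fresh vis v hv0 (by rw [hlen]; exact hv1) hfresh
      omega
    · intro ns vis hlen hns hcf
      induction ns with
      | nil => exact visitInv_refl (fun s hs => absurd hs (by simp))
      | cons nb ns' ih =>
        have hnb := hns nb (by simp)
        have hmark : vget vis nb = true :=
          all_marked_of_cf_zero vis (by omega) nb hnb.1 (by rw [hlen]; exact hnb.2)
        have hb := ih (fun x hx => hns x (List.mem_cons_of_mem _ hx))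
        rw [List.foldl_cons]
        simp only [hmark, if_true]
        refine ⟨hb.len, hb.cf, hb.mono, ?_, ?_, hb.closed⟩
        · intro x hx0 hx1 hm
          rcases hb.sound x hx0 hx1 hm with h | ⟨s, hs, hf, hr⟩
          · exact Or.inl h
          · exact Or.inr ⟨s, List.mem_cons_of_mem _ hs, hf, hr⟩
        · intro s hs
          rcases List.mem_cons.1 hs with rfl | hs'
          · exact hb.mono s hnb.1 hnb.2 hmark
          · exact hb.start s hs'
  | succ f ihQ =>
    have pd : ∀ (v : Int) (vis : List Bool), vis.length = L → 0 ≤ v → v < (L:Int) →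
        vget vis v = false → vis.count false ≤ f + 1 →
        VisitInv g L (· = v) vis (dfsA (f+1) g v vis) := by
      intro v vis hlen hv0 hv1 hfresh hcf
      have hv1' : v < (vis.length : Int) := by rw [hlen]; exact hv1
      have hlen₁ : (vset vis v true).length = L := by rw [length_vset, hlen]
      have hcf₁ : (vset vis v true).count false + 1 = vis.count false :=
        cf_vset _ _ hv0 hv1' hfresh
      have hvv : ∀ (x : Int), 0 ≤ x → x < (L:Int) →
          vget (vset vis v true) x = if x = v then true else vget vis x := by
        intro x hx0 hx1
        exact vget_vset vis v x hv0 hv1' hx0 (by rw [hlen]; exact hx1)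
      have hmv : ∀ y, 0 ≤ y → y < (L:Int) → vget vis y = true → vget (vset vis v true) y = true := by
        intro y hy0 hy1 hy
        rw [hvv y hy0 hy1]
        split <;> simp [hy]
      have hb₁ := ihQ.2 (g.getD v []) (vset vis v true) hlen₁
        (fun x hx => hGV v x hx) (by omega)
      show VisitInv g L (· = v) vis
        ((g.getD v []).foldl (fun vv nb => if vget vv nb then vv else dfsA f g nb vv)
          (vset vis v true))
      refine ⟨hb₁.len.trans (length_vset _ _ _), by have := hb₁.cf; omega, ?_, ?_, ?_, ?_⟩
      · intro x hx0 hx1 hm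
        exact hb₁.mono x hx0 hx1 (hmv x hx0 hx1 hm)
      · intro x hx0 hx1 hm
        rcases hb₁.sound x hx0 hx1 hm with hm₁ | ⟨s, hsmem, hf₁, hr₁⟩
        · rw [hvv x hx0 hx1] at hm₁
          by_cases hxv : x = v
          · subst hxv
            exact Or.inr ⟨x, rfl, hfresh, Reach.refl x hfresh⟩
          · rw [if_neg hxv] at hm₁
            exact Or.inl hm₁
        · have hsr := hGV v s hsmem
          have hsv : ¬ s = v := by
            intro h
            rw [hvv s hsr.1 hsr.2, if_pos h] at hf₁
            simp at hf₁
          have hf₀ : vget vis s = false := by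
            rw [hvv s hsr.1 hsr.2, if_neg hsv] at hf₁
            exact hf₁
          refine Or.inr ⟨v, rfl, hfresh, ?_⟩
          exact reach_trans (Reach.tail (Reach.refl v hfresh) hsmem hf₀)
            (reach_anti hGV hsr hmv hr₁)
      · intro s hs
        cases hs
        have : vget (vset vis v true) v = true := by
          rw [hvv v hv0 hv1]; simp
        exact hb₁.mono v hv0 hv1 this
      · intro w hw0 hw1 hf hm x hmem
        by_cases hwv : w = v
        · subst hwv
          exact hb₁.start x hmem
        · have hf₁ : vget (vset vis v true) w = false := by
            rw [hvv w hw0 hw1, if_neg hwv]; exact hf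
          exact hb₁.closed w hw0 hw1 hf₁ hm x hmem
    refine ⟨pd, ?_⟩
    intro ns vis hlen hns hcf
    induction ns generalizing vis with
    | nil => exact visitInv_refl (fun s hs => absurd hs (by simp))
    | cons nb ns' ih =>
      have hnb := hns nb (by simp)
      rw [List.foldl_cons]
      by_cases hm : vget vis nb = true
      · simp only [hm, if_true]
        have hb := ih vis hlen (fun x hx => hns x (List.mem_cons_of_mem _ hx)) hcf
        refine ⟨hb.len, hb.cf, hb.mono, ?_, ?_, hb.closed⟩
        · intro x hx0 hx1 hmx
          rcases hb.sound x hx0 hx1 hmx with h | ⟨s, hs, hf, hr⟩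
          · exact Or.inl h
          · exact Or.inr ⟨s, List.mem_cons_of_mem _ hs, hf, hr⟩
        · intro s hs
          rcases List.mem_cons.1 hs with rfl | hs'
          · exact hb.mono s hnb.1 hnb.2 hm
          · exact hb.start s hs'
      · simp only [hm]
        have hfresh : vget vis nb = false := by simpa using hm
        have h1 := pd nb vis hlen hnb.1 hnb.2 hfresh hcf
        have h2 := ih (dfsA (f+1) g nb vis) (h1.len.trans hlen)
          (fun x hx => hns x (List.mem_cons_of_mem _ hx))
          (le_trans h1.cf hcf)
        exact visitInv_trans hGV h1 h2
          (fun s hs => by rw [hs]; simp)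
          (fun s hs => List.mem_cons_of_mem _ hs)
          (fun s hs => by rcases List.mem_cons.1 hs with rfl | h; exacts [Or.inl rfl, Or.inr h])
          (fun s hs => by rw [hs]; exact hnb)
          (fun s hs => hns s (List.mem_cons_of_mem _ hs))

lemma getD_buildGraph (n : Int) (edges : List (Int × Int)) (w : Int) :
    (buildGraph n edges).getD w [] = (edges.filter (fun p => p.1 == w)).map (·.2) := by
  have hinit : ∀ (l : List Int) (d : PySem.Dict Int (List Int)), d.getD w [] = [] →
      (l.foldl (fun d i => d.insert i ([] : List Int)) d).getD w [] = [] := by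
    intro l
    induction l with
    | nil => intro d hd; exact hd
    | cons i l' ih =>
      intro d hd
      rw [List.foldl_cons]
      apply ih
      rw [PySem.Dict.getD_insert]
      split <;> simp [hd]
  unfold buildGraph
  rw [PySem.Dict.getD_foldl_modify_append]
  rw [hinit _ _ (by simp [PySem.Dict.getD_empty])]
  simp

lemma edge_mem (n : Int) (edges : List (Int × Int)) (w x : Int) :
    x ∈ (buildGraph n edges).getD w [] ↔ (w, x) ∈ edges := by
  rw [getD_buildGraph]
  simp only [List.mem_map, List.mem_filter, beq_iff_eq]
  constructor
  · rintro ⟨p, ⟨hp, rfl⟩, rfl⟩; exact hp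
  · intro h; exact ⟨(w, x), ⟨h, rfl⟩, rfl⟩

-- vis is closed under the graph's edges on in-range sources
def GClosed (g : PySem.Dict Int (List Int)) (L : Nat) (vis : List Bool) : Prop :=
  ∀ w x, 0 ≤ w → w < (L:Int) → x ∈ g.getD w [] → vget vis w = true → vget vis x = true

lemma reach_to_ereach {n : Int} {edges : List (Int × Int)} {vis : List Bool} {s x : Int}
    (h : Reach (buildGraph n edges) vis s x) : EReach edges s x := by
  induction h with
  | refl => exact EReach.refl _
  | tail _ hmem _ ih => exact EReach.tail ih ((edge_mem n edges _ _).1 hmem)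

-- characterisation of A's dfs on an edge-closed base: reachable-from-v, plain
lemma dfs_char (n : Int) (edges : List (Int × Int)) (L : Nat)
    (hGV : GV (buildGraph n edges) L) (f : Nat) (v : Int) (vis : List Bool)
    (hlen : vis.length = L) (hv0 : 0 ≤ v) (hv1 : v < (L:Int)) (hfresh : vget vis v = false)
    (hcf : vis.count false ≤ f) (hcl : GClosed (buildGraph n edges) L vis) :
    (dfsA f (buildGraph n edges) v vis).length = L
    ∧ GClosed (buildGraph n edges) L (dfsA f (buildGraph n edges) v vis)
    ∧ ∀ x : Int, 0 ≤ x → x < (L:Int) →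
        (vget (dfsA f (buildGraph n edges) v vis) x = true ↔
          vget vis x = true ∨ EReach edges v x) := by
  have b := (dfs_bundle (buildGraph n edges) L hGV f).1 v vis hlen hv0 hv1 hfresh hcf
  have hcomplete : ∀ x : Int, EReach edges v x →
      (0 ≤ x ∧ x < (L:Int)) ∧ vget (dfsA f (buildGraph n edges) v vis) x = true := by
    intro x h
    induction h with
    | refl => exact ⟨⟨hv0, hv1⟩, b.start v rfl⟩
    | @tail w x' _ hE ih =>
      have hmem := (edge_mem n edges w x').2 hE
      have hx := hGV w x' hmem
      obtain ⟨⟨hw0, hw1⟩, hvw⟩ := ih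
      refine ⟨hx, ?_⟩
      by_cases hw : vget vis w = true
      · exact b.mono x' hx.1 hx.2 (hcl w x' hw0 hw1 hmem hw)
      · exact b.closed w hw0 hw1 (by simpa using hw) hvw x' hmem
  refine ⟨b.len.trans hlen, ?_, ?_⟩
  · intro w x hw0 hw1 hmem hvw
    have hx := hGV w x hmem
    by_cases hw : vget vis w = true
    · exact b.mono x hx.1 hx.2 (hcl w x hw0 hw1 hmem hw)
    · exact b.closed w hw0 hw1 (by simpa using hw) hvw x hmem
  · intro x hx0 hx1
    constructor
    · intro h
      rcases b.sound x hx0 hx1 h with h' | ⟨s, hs, _, hr⟩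
      · exact Or.inl h'
      · cases hs
        exact Or.inr (reach_to_ereach hr)
    · rintro (h | h)
      · exact b.mono x hx0 hx1 h
      · exact (hcomplete x h).2

-- ----- B-side lemmas -----

-- all edge endpoints are valid vertices
def EB (n : Int) (l : List (Int × Int)) : Prop :=
  ∀ e ∈ l, 1 ≤ e.1 ∧ e.1 ≤ n ∧ 1 ≤ e.2 ∧ e.2 ≤ n

lemma relaxStepL_fired (p : List Bool × Bool) (e : Int × Int)
    (hc : (vget p.1 e.1 && !vget p.1 e.2) = true) :
    relaxStepL p e = (vset p.1 e.2 true, true) := by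
  unfold relaxStepL; rw [if_pos hc]

lemma relaxStepL_skip (p : List Bool × Bool) (e : Int × Int)
    (hc : (vget p.1 e.1 && !vget p.1 e.2) = false) :
    relaxStepL p e = p := by
  unfold relaxStepL; rw [hc]; simp

lemma relaxL_len : ∀ (l : List (Int × Int)) (p : List Bool × Bool),
    (l.foldl relaxStepL p).1.length = p.1.length := by
  intro l
  induction l with
  | nil => intro p; rfl
  | cons e l ih =>
    intro p
    rw [List.foldl_cons]
    by_cases hc : (vget p.1 e.1 && !vget p.1 e.2) = true
    · rw [relaxStepL_fired p e hc, ih]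
      exact length_vset _ _ _
    · rw [relaxStepL_skip p e (by simpa using hc), ih]

lemma relaxL_flag : ∀ (l : List (Int × Int)) (p : List Bool × Bool),
    p.2 = true → (l.foldl relaxStepL p).2 = true := by
  intro l
  induction l with
  | nil => intro p h; exact h
  | cons e l ih =>
    intro p h
    rw [List.foldl_cons]
    by_cases hc : (vget p.1 e.1 && !vget p.1 e.2) = true
    · rw [relaxStepL_fired p e hc]
      exact ih _ rfl
    · rw [relaxStepL_skip p e (by simpa using hc)]
      exact ih _ h

lemma relaxL_mono (n : Int) : ∀ (l : List (Int × Int)), EB n l → ∀ (p : List Bool × Bool),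
    p.1.length = (n+1).toNat →
    ∀ x, 0 ≤ x → x < (((n+1).toNat : Nat) : Int) → vget p.1 x = true →
    vget (l.foldl relaxStepL p).1 x = true := by
  intro l
  induction l with
  | nil => intro _ p _ x _ _ hx; exact hx
  | cons e l ih =>
    intro hl p hlen x hx0 hx1 hx
    have he := hl e (by simp)
    rw [List.foldl_cons]
    by_cases hc : (vget p.1 e.1 && !vget p.1 e.2) = true
    · rw [relaxStepL_fired p e hc]
      refine ih (fun e' he' => hl e' (List.mem_cons_of_mem _ he'))
        (vset p.1 e.2 true, true) (by rw [length_vset]; exact hlen) x hx0 hx1 ?_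
      rw [vget_vset p.1 e.2 x (by omega) (by rw [hlen]; omega) hx0 (by rw [hlen]; omega)]
      split <;> simp [hx]
    · rw [relaxStepL_skip p e (by simpa using hc)]
      exact ih (fun e' he' => hl e' (List.mem_cons_of_mem _ he')) p hlen x hx0 hx1 hx

lemma relaxL_unchanged : ∀ (l : List (Int × Int)) (s : List Bool),
    (l.foldl relaxStepL (s, false)).2 = false →
    (l.foldl relaxStepL (s, false)).1 = s ∧ ∀ e ∈ l, vget s e.1 = true → vget s e.2 = true := by
  intro l
  induction l with
  | nil => intro s _; exact ⟨rfl, by simp⟩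
  | cons e l ih =>
    intro s
    rw [List.foldl_cons]
    by_cases hc : (vget s e.1 && !vget s e.2) = true
    · rw [relaxStepL_fired (s, false) e hc]
      intro hflag
      rw [relaxL_flag l _ rfl] at hflag
      cases hflag
    · rw [relaxStepL_skip (s, false) e (by simpa using hc)]
      intro hflag
      obtain ⟨h1, h2⟩ := ih s hflag
      refine ⟨h1, ?_⟩
      intro e' he' hm
      rcases List.mem_cons.1 he' with rfl | he''
      · cases hv : vget s e'.2
        · exfalso
          apply hc
          show (vget s e'.1 && !vget s e'.2) = true
          rw [hm, hv]
          rfl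
        · rfl
      · exact h2 e' he'' hm

lemma relaxL_sound (n : Int) (Q : Int → Prop) (edges : List (Int × Int)) (hed : EB n edges)
    (hQe : ∀ e ∈ edges, Q e.1 → Q e.2) :
    ∀ (l : List (Int × Int)), (∀ e ∈ l, e ∈ edges) → ∀ (p : List Bool × Bool),
    p.1.length = (n+1).toNat →
    (∀ x, 0 ≤ x → x < (((n+1).toNat : Nat) : Int) → vget p.1 x = true → Q x) →
    ∀ x, 0 ≤ x → x < (((n+1).toNat : Nat) : Int) → vget (l.foldl relaxStepL p).1 x = true → Q x := by
  intro l
  induction l with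
  | nil => intro _ p _ hp x hx0 hx1 hx; exact hp x hx0 hx1 hx
  | cons e l ih =>
    intro hl p hlen hp
    have he := hed e (hl e (by simp))
    rw [List.foldl_cons]
    by_cases hc : (vget p.1 e.1 && !vget p.1 e.2) = true
    · rw [relaxStepL_fired p e hc]
      refine ih (fun e' he' => hl e' (List.mem_cons_of_mem _ he'))
        (vset p.1 e.2 true, true) (by rw [length_vset]; exact hlen) ?_
      intro x hx0 hx1 hx
      rw [vget_vset p.1 e.2 x (by omega) (by rw [hlen]; omega) hx0 (by rw [hlen]; omega)] at hx
      by_cases hxe : x = e.2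
      · subst hxe
        simp only [Bool.and_eq_true] at hc
        exact hQe e (hl e (by simp)) (hp e.1 (by omega) (by omega) hc.1)
      · rw [if_neg hxe] at hx
        exact hp x hx0 hx1 hx
    · rw [relaxStepL_skip p e (by simpa using hc)]
      exact ih (fun e' he' => hl e' (List.mem_cons_of_mem _ he')) p hlen hp

lemma relaxL_count_le (n : Int) : ∀ (l : List (Int × Int)), EB n l → ∀ (p : List Bool × Bool),
    p.1.length = (n+1).toNat →
    (l.foldl relaxStepL p).1.count false ≤ p.1.count false := by
  intro l
  induction l with
  | nil => intro _ p _; exact le_refl _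
  | cons e l ih =>
    intro hl p hlen
    have he := hl e (by simp)
    rw [List.foldl_cons]
    by_cases hc : (vget p.1 e.1 && !vget p.1 e.2) = true
    · rw [relaxStepL_fired p e hc]
      have hfresh : vget p.1 e.2 = false := by
        simp only [Bool.and_eq_true, Bool.not_eq_true'] at hc
        exact hc.2
      have hdrop := cf_vset p.1 e.2 (by omega) (by rw [hlen]; omega) hfresh
      have hrest := ih (fun e' he' => hl e' (List.mem_cons_of_mem _ he'))
        (vset p.1 e.2 true, true) (by rw [length_vset]; exact hlen)
      dsimp only at hrest ⊢
      omega
    · rw [relaxStepL_skip p e (by simpa using hc)]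
      exact ih (fun e' he' => hl e' (List.mem_cons_of_mem _ he')) p hlen

lemma relaxL_progress (n : Int) : ∀ (l : List (Int × Int)), EB n l → ∀ (s : List Bool),
    s.length = (n+1).toNat → (l.foldl relaxStepL (s, false)).2 = true →
    (l.foldl relaxStepL (s, false)).1.count false < s.count false := by
  intro l
  induction l with
  | nil => intro _ s _ h; cases h
  | cons e l ih =>
    intro hl s hlen
    have he := hl e (by simp)
    rw [List.foldl_cons]
    by_cases hc : (vget s e.1 && !vget s e.2) = true
    · rw [relaxStepL_fired (s, false) e hc]
      intro _
      have hfresh : vget s e.2 = false := by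
        simp only [Bool.and_eq_true, Bool.not_eq_true'] at hc
        exact hc.2
      have hdrop := cf_vset s e.2 (by omega) (by rw [hlen]; omega) hfresh
      have hle := relaxL_count_le n l (fun e' he' => hl e' (List.mem_cons_of_mem _ he'))
        (vset s e.2 true, true) (by rw [length_vset]; exact hlen)
      dsimp only at hle ⊢
      omega
    · rw [relaxStepL_skip (s, false) e (by simpa using hc)]
      exact ih (fun e' he' => hl e' (List.mem_cons_of_mem _ he')) s hlen

lemma closeBL_succ (f : Nat) (edges : List (Int × Int)) (inset : List Bool) :
    closeBL (f + 1) edges inset =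
      if (edges.foldl relaxStepL (inset, false)).2
      then closeBL f edges (edges.foldl relaxStepL (inset, false)).1
      else (edges.foldl relaxStepL (inset, false)).1 := rfl

lemma closeBL_spec (n : Int) (edges : List (Int × Int)) (hed : EB n edges) :
    ∀ (f : Nat) (inset : List Bool), inset.length = (n+1).toNat → inset.count false < f →
    (closeBL f edges inset).length = (n+1).toNat
    ∧ (∀ x, 0 ≤ x → x < (((n+1).toNat : Nat) : Int) → vget inset x = true →
        vget (closeBL f edges inset) x = true)
    ∧ (∀ e ∈ edges, vget (closeBL f edges inset) e.1 = true →
        vget (closeBL f edges inset) e.2 = true)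
    ∧ (∀ Q : Int → Prop, (∀ x, 0 ≤ x → x < (((n+1).toNat : Nat) : Int) → vget inset x = true → Q x) →
        (∀ e ∈ edges, Q e.1 → Q e.2) →
        ∀ x, 0 ≤ x → x < (((n+1).toNat : Nat) : Int) → vget (closeBL f edges inset) x = true → Q x) := by
  intro f
  induction f with
  | zero => intro inset _ h; omega
  | succ f ih =>
    intro inset hlen hf
    rw [closeBL_succ]
    by_cases hst : (edges.foldl relaxStepL (inset, false)).2 = true
    · rw [if_pos hst]
      have hlen1 : (edges.foldl relaxStepL (inset, false)).1.length = (n+1).toNat := by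
        rw [relaxL_len]; exact hlen
      have hcnt : (edges.foldl relaxStepL (inset, false)).1.count false < f := by
        have := relaxL_progress n edges hed inset hlen hst
        omega
      obtain ⟨i0, i1, i2, i3⟩ := ih _ hlen1 hcnt
      refine ⟨i0, ?_, i2, ?_⟩
      · intro x hx0 hx1 hx
        exact i1 x hx0 hx1 (relaxL_mono n edges hed (inset, false) hlen x hx0 hx1 hx)
      · intro Q hQ0 hQe x hx0 hx1 hx
        exact i3 Q (relaxL_sound n Q edges hed hQe edges (fun _ h => h) (inset, false) hlen hQ0)
          hQe x hx0 hx1 hx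
    · rw [if_neg hst]
      obtain ⟨h1, h2⟩ := relaxL_unchanged edges inset (by simpa using hst)
      rw [h1]
      exact ⟨hlen, fun x _ _ hx => hx, fun e he hm => h2 e he hm,
        fun Q hQ0 _ x hx0 hx1 hx => hQ0 x hx0 hx1 hx⟩

-- the closure table computed from {i} is exactly reachability from i
lemma closure_charL (n : Int) (edges : List (Int × Int)) (hn : 1 ≤ n) (hed : EB n edges)
    (i : Int) (hi0 : 1 ≤ i) (hi1 : i ≤ n) :
    (closeBL (n.toNat + 3) edges (vset (List.replicate (n+1).toNat false) i true)).length = (n+1).toNat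
    ∧ ∀ x, 0 ≤ x → x < (((n+1).toNat : Nat) : Int) →
      (vget (closeBL (n.toNat + 3) edges (vset (List.replicate (n+1).toNat false) i true)) x = true
        ↔ EReach edges i x) := by
  have hlen0 : (vset (List.replicate (n+1).toNat false) i true).length = (n+1).toNat := by
    rw [length_vset, List.length_replicate]
  have hrep : (List.replicate (n+1).toNat false).count false = (n+1).toNat := by simp
  have hcnt0 : (vset (List.replicate (n+1).toNat false) i true).count false + 1 = (n+1).toNat := by
    have h := cf_vset (List.replicate (n+1).toNat false) i (by omega)
      (by rw [List.length_replicate]; omega) (vget_replicate _ _)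
    rw [hrep] at h
    exact h
  have hv0 : ∀ x, 0 ≤ x → x < (((n+1).toNat : Nat) : Int) →
      vget (vset (List.replicate (n+1).toNat false) i true) x = if x = i then true else false := by
    intro x hx0 hx1
    rw [vget_vset _ i x (by omega) (by rw [List.length_replicate]; omega) hx0
      (by rw [List.length_replicate]; omega)]
    split
    · rfl
    · exact vget_replicate _ _
  obtain ⟨s0, s1, s2, s3⟩ := closeBL_spec n edges hed (n.toNat + 3) _ hlen0 (by omega)
  refine ⟨s0, ?_⟩
  intro x hx0 hx1
  constructor
  · intro hx
    refine s3 (EReach edges i) ?_ ?_ x hx0 hx1 hx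
    · intro y hy0 hy1 hy
      rw [hv0 y hy0 hy1] at hy
      by_cases hyi : y = i
      · subst hyi
        exact EReach.refl y
      · rw [if_neg hyi] at hy
        cases hy
    · intro e he hq
      exact EReach.tail hq (by simpa using he)
  · intro h
    clear hx0 hx1
    induction h with
    | refl =>
      refine s1 i (by omega) (by omega) ?_
      rw [hv0 i (by omega) (by omega), if_pos rfl]
    | @tail w x' _ hE ih =>
      exact s2 (w, x') hE ih

-- the "reached = [a or b for a, b in zip(reached, comp)]" union
lemma zip_or_spec (a b : List Bool) (hab : a.length = b.length) :
    (List.zipWith (fun x y => x || y) a b).length = a.length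
    ∧ ∀ (x : Int), 0 ≤ x → x < (a.length : Int) →
      (vget (List.zipWith (fun x y => x || y) a b) x = true ↔
        vget a x = true ∨ vget b x = true) := by
  have hlen : (List.zipWith (fun x y => x || y) a b).length = a.length := by
    rw [List.length_zipWith, hab, Nat.min_self]
  refine ⟨hlen, ?_⟩
  intro x hx0 hx1
  rw [vget_eq_getElem' _ x hx0 (by rw [hlen]; exact hx1),
    vget_eq_getElem' a x hx0 hx1, vget_eq_getElem' b x hx0 (by rw [← hab]; exact hx1)]
  rw [List.getElem_zipWith]
  simp

-- one fresh phase-1 step: A's recursive dfs marks exactly what B's closure-union marks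
lemma stepEq (n : Int) (edges : List (Int × Int)) (hn : 1 ≤ n)
    (hed : ∀ e ∈ edges, 1 ≤ e.1 ∧ e.1 ≤ n ∧ 1 ≤ e.2 ∧ e.2 ≤ n)
    (hGV : GV (buildGraph n edges) (n+1).toNat)
    (i : Int) (hi0 : 1 ≤ i) (hi1 : i ≤ n) (vis : List Bool)
    (hlen : vis.length = (n+1).toNat) (hcl : GClosed (buildGraph n edges) (n+1).toNat vis)
    (hfresh : vget vis i = false) :
    dfsA (n.toNat + 2) (buildGraph n edges) i vis =
      List.zipWith (fun a b => a || b) vis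
        (closeBL (n.toNat + 3) edges (vset (List.replicate (n+1).toNat false) i true)) := by
  have hcf : vis.count false ≤ n.toNat + 2 := by
    have h1 := List.count_le_length (l := vis) (a := false)
    omega
  obtain ⟨hlenA, _, hcharA⟩ := dfs_char n edges (n+1).toNat hGV (n.toNat + 2) i vis hlen
    (by omega) (by omega) hfresh hcf hcl
  obtain ⟨hlenC, hcharC⟩ := closure_charL n edges hn hed i hi0 hi1
  obtain ⟨hlenB, hcharB⟩ := zip_or_spec vis
    (closeBL (n.toNat + 3) edges (vset (List.replicate (n+1).toNat false) i true))
    (by rw [hlen, hlenC])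
  apply List.ext_getElem (by rw [hlenA, hlenB, hlen])
  intro j h1 h2
  have hj1 : (j : Int) < (((n+1).toNat : Nat) : Int) := by
    rw [hlenA] at h1
    exact_mod_cast h1
  have hiffA := hcharA (j : Int) (by positivity) hj1
  have hiffB := hcharB
  have hiff : vget (dfsA (n.toNat + 2) (buildGraph n edges) i vis) (j : Int) = true ↔
      vget (List.zipWith (fun a b => a || b) vis
        (closeBL (n.toNat + 3) edges (vset (List.replicate (n+1).toNat false) i true)))
        (j : Int) = true := by
    rw [hiffA, hiffB (j : Int) (by positivity) (by rw [hlen]; exact hj1),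
      hcharC (j : Int) (by positivity) hj1]
  rw [vget_eq_getElem _ j h1, vget_eq_getElem _ j h2] at hiff
  exact Bool.eq_iff_iff.mpr (by constructor <;> (intro h; first | exact hiff.1 h | exact hiff.2 h))

-- phase 1: from pointwise-equal states the two folds stay literally equal
lemma phase1 (n : Int) (edges : List (Int × Int)) (hn : 1 ≤ n)
    (hed : ∀ e ∈ edges, 1 ≤ e.1 ∧ e.1 ≤ n ∧ 1 ≤ e.2 ∧ e.2 ≤ n)
    (hGV : GV (buildGraph n edges) (n+1).toNat) :
    ∀ (l : List Int), (∀ i ∈ l, 1 ≤ i ∧ i ≤ n) →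
    ∀ (vis : List Bool) (last : Int), vis.length = (n+1).toNat →
    GClosed (buildGraph n edges) (n+1).toNat vis →
    (l.foldl (fun (st : List Bool × Int) i =>
        if vget st.1 i then st else (dfsA (n.toNat + 2) (buildGraph n edges) i st.1, i)) (vis, last))
      = (l.foldl (fun (st : List Bool × Int) i =>
        if vget st.1 i then st
        else (List.zipWith (fun a b => a || b) st.1
          (closeBL (n.toNat + 3) edges (vset (List.replicate (n+1).toNat false) i true)), i))
        (vis, last))
    ∧ (l.foldl (fun (st : List Bool × Int) i =>
        if vget st.1 i then st else (dfsA (n.toNat + 2) (buildGraph n edges) i st.1, i)) (vis, last)).1.length = (n+1).toNat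
    ∧ GClosed (buildGraph n edges) (n+1).toNat
        (l.foldl (fun (st : List Bool × Int) i =>
          if vget st.1 i then st else (dfsA (n.toNat + 2) (buildGraph n edges) i st.1, i)) (vis, last)).1
    ∧ ((l.foldl (fun (st : List Bool × Int) i =>
          if vget st.1 i then st else (dfsA (n.toNat + 2) (buildGraph n edges) i st.1, i)) (vis, last)).2 = last
        ∨ (1 ≤ (l.foldl (fun (st : List Bool × Int) i =>
            if vget st.1 i then st else (dfsA (n.toNat + 2) (buildGraph n edges) i st.1, i)) (vis, last)).2
          ∧ (l.foldl (fun (st : List Bool × Int) i =>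
            if vget st.1 i then st else (dfsA (n.toNat + 2) (buildGraph n edges) i st.1, i)) (vis, last)).2 ≤ n)) := by
  intro l
  induction l with
  | nil =>
    intro _ vis last hlen hcl
    exact ⟨rfl, hlen, hcl, Or.inl rfl⟩
  | cons i l ih =>
    intro hil vis last hlen hcl
    have hi := hil i (by simp)
    rw [List.foldl_cons, List.foldl_cons]
    by_cases hvis : vget vis i = true
    · rw [if_pos hvis, if_pos hvis]
      exact ih (fun j hj => hil j (List.mem_cons_of_mem _ hj)) vis last hlen hcl
    · have hfresh : vget vis i = false := by simpa using hvis
      rw [if_neg hvis, if_neg hvis]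
      have hstep := stepEq n edges hn hed hGV i hi.1 hi.2 vis hlen hcl hfresh
      have hcf : vis.count false ≤ n.toNat + 2 := by
        have h1 := List.count_le_length (l := vis) (a := false)
        omega
      obtain ⟨hlen', hcl', _⟩ := dfs_char n edges (n+1).toNat hGV (n.toNat + 2) i vis hlen
        (by omega) (by omega) hfresh hcf hcl
      rw [← hstep]
      obtain ⟨heq, hl1, hc1, hlast⟩ := ih (fun j hj => hil j (List.mem_cons_of_mem _ hj))
        (dfsA (n.toNat + 2) (buildGraph n edges) i vis) i hlen' hcl'
      refine ⟨heq, hl1, hc1, ?_⟩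
      rcases hlast with h | h
      · right
        rw [h]
        omega
      · exact Or.inr h

-- ===== VERDICT (by name: the statement is the Claim_ definition above) =====
theorem find_mother_vertex_spec : Claim_equal_find_mother_vertex := by
  intro n edges hdom hpre
  obtain ⟨hn, hed⟩ := hpre
  have hGV : GV (buildGraph n edges) (n+1).toNat := by
    intro w x hx
    rw [edge_mem] at hx
    have h := hed (w, x) hx
    dsimp only at h
    constructor <;> omega
  have hcl0 : GClosed (buildGraph n edges) (n+1).toNat (List.replicate (n+1).toNat false) := by
    intro w x _ _ _ hvw
    rw [vget_replicate] at hvw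
    cases hvw
  have hrange : ∀ i ∈ PySem.List.pyRange 2 (n+1) 1, 1 ≤ i ∧ i ≤ n := by
    intro i hi
    rw [PySem.List.mem_pyRange_one] at hi
    omega
  have hhead : PySem.List.pyRange 1 (n+1) 1 = 1 :: PySem.List.pyRange 2 (n+1) 1 := by
    rw [PySem.List.pyRange_one_cons (by omega)]
    norm_num
  have hfresh1 : vget (List.replicate (n+1).toNat false) 1 = false := vget_replicate _ _
  have hstep1 := stepEq n edges hn hed hGV 1 le_rfl hn (List.replicate (n+1).toNat false)
    (by simp) hcl0 hfresh1
  have hcf1 : (List.replicate (n+1).toNat false).count false ≤ n.toNat + 2 := by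
    simp
    omega
  obtain ⟨hlen1, hcl1, _⟩ := dfs_char n edges (n+1).toNat hGV (n.toNat + 2) 1
    (List.replicate (n+1).toNat false) (by simp) (by omega) (by omega) hfresh1 hcf1 hcl0
  obtain ⟨heq, hlenF, _, hlastF⟩ := phase1 n edges hn hed hGV (PySem.List.pyRange 2 (n+1) 1) hrange
    (dfsA (n.toNat + 2) (buildGraph n edges) 1 (List.replicate (n+1).toNat false)) 1 hlen1 hcl1
  unfold Spec_find_mother_vertex find_mother_vertex find_mother_vertex_alt
  dsimp only
  rw [hhead, List.foldl_cons, List.foldl_cons]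
  dsimp only
  rw [if_neg (show ¬ vget (List.replicate (n+1).toNat false) 1 = true by rw [hfresh1]; simp),
    if_neg (show ¬ vget (List.replicate (n+1).toNat false) 1 = true by rw [hfresh1]; simp),
    ← hstep1, ← heq]
  have hlast : 1 ≤ (( PySem.List.pyRange 2 (n+1) 1).foldl
      (fun (st : List Bool × Int) i =>
        if vget st.1 i then st else (dfsA (n.toNat + 2) (buildGraph n edges) i st.1, i))
      (dfsA (n.toNat + 2) (buildGraph n edges) 1 (List.replicate (n+1).toNat false), 1)).2
      ∧ (( PySem.List.pyRange 2 (n+1) 1).foldl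
      (fun (st : List Bool × Int) i =>
        if vget st.1 i then st else (dfsA (n.toNat + 2) (buildGraph n edges) i st.1, i))
      (dfsA (n.toNat + 2) (buildGraph n edges) 1 (List.replicate (n+1).toNat false), 1)).2 ≤ n := by
    rcases hlastF with h | h
    · rw [h]
      omega
    · exact h
  have hcomp : closeBL (n.toNat + 3) edges
      (vset (List.replicate (n+1).toNat false)
        ((PySem.List.pyRange 2 (n+1) 1).foldl
          (fun (st : List Bool × Int) i =>
            if vget st.1 i then st else (dfsA (n.toNat + 2) (buildGraph n edges) i st.1, i))
          (dfsA (n.toNat + 2) (buildGraph n edges) 1 (List.replicate (n+1).toNat false), 1)).2 true)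
      = dfsA (n.toNat + 2) (buildGraph n edges)
          ((PySem.List.pyRange 2 (n+1) 1).foldl
            (fun (st : List Bool × Int) i =>
              if vget st.1 i then st else (dfsA (n.toNat + 2) (buildGraph n edges) i st.1, i))
            (dfsA (n.toNat + 2) (buildGraph n edges) 1 (List.replicate (n+1).toNat false), 1)).2
          (List.replicate (n+1).toNat false) := by
    obtain ⟨hlenC, hcharC⟩ := closure_charL n edges hn hed _ hlast.1 hlast.2
    have hcfr : (List.replicate (n+1).toNat false).count false ≤ n.toNat + 2 := hcf1
    obtain ⟨hlenA2, _, hcharA2⟩ := dfs_char n edges (n+1).toNat hGV (n.toNat + 2) _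
      (List.replicate (n+1).toNat false) (by simp) (le_trans zero_le_one hlast.1)
      (lt_of_le_of_lt hlast.2 (by omega)) (vget_replicate _ _) hcfr hcl0
    apply List.ext_getElem (by rw [hlenC, hlenA2])
    intro j h1 h2
    have hj1 : (j : Int) < (((n+1).toNat : Nat) : Int) := by
      rw [hlenC] at h1
      exact_mod_cast h1
    have hiff : vget (closeBL (n.toNat + 3) edges
        (vset (List.replicate (n+1).toNat false)
          ((PySem.List.pyRange 2 (n+1) 1).foldl
            (fun (st : List Bool × Int) i =>
              if vget st.1 i then st else (dfsA (n.toNat + 2) (buildGraph n edges) i st.1, i))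
            (dfsA (n.toNat + 2) (buildGraph n edges) 1 (List.replicate (n+1).toNat false), 1)).2 true))
        (j : Int) = true
        ↔ vget (dfsA (n.toNat + 2) (buildGraph n edges)
            ((PySem.List.pyRange 2 (n+1) 1).foldl
              (fun (st : List Bool × Int) i =>
                if vget st.1 i then st else (dfsA (n.toNat + 2) (buildGraph n edges) i st.1, i))
              (dfsA (n.toNat + 2) (buildGraph n edges) 1 (List.replicate (n+1).toNat false), 1)).2
            (List.replicate (n+1).toNat false)) (j : Int) = true := by
      rw [hcharC (j : Int) (by positivity) hj1, hcharA2 (j : Int) (by positivity) hj1,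
        vget_replicate]
      simp
    rw [vget_eq_getElem _ j h1, vget_eq_getElem _ j h2] at hiff
    exact Bool.eq_iff_iff.mpr (by constructor <;> (intro h; first | exact hiff.1 h | exact hiff.2 h))
  rw [hcomp]
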